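-- pv_equiv track=rewrite | github.com/Prince20061712/JARVIS-master | jarvis-system/backend/emotional_intelligence/emotional_memory/emotional_history.py | _same_emotion_cluster
-- ===== SOURCE A (Python) =====
-- def _same_emotion_cluster(emotion1: str, emotion2: str) -> bool:
--     """Check if emotions belong to same cluster"""
--     clusters = {
--         'sadness': ['sadness', 'grief', 'melancholy', 'despair'],
--         'anger': ['anger', 'frustration', 'irritation', 'rage'],
--         'fear': ['fear', 'anxiety', 'worry', 'dread'],
--         'joy': ['joy', 'happiness', 'ecstasy', 'delight'],
--         'peace': ['peace', 'calm', 'serenity', 'contentment'],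
--         'love': ['love', 'affection', 'compassion', 'tenderness']
--     }
--
--     for cluster in clusters.values():
--         if emotion1 in cluster and emotion2 in cluster:
--             return True
--
--     return False
-- ===== SOURCE B (Python) =====
-- # Flat precomputed emotion -> cluster-id index; two O(1) lookups instead of a per-cluster scan.
-- _CLUSTER_ID = {
--     'sadness': 0, 'grief': 0, 'melancholy': 0, 'despair': 0,
--     'anger': 1, 'frustration': 1, 'irritation': 1, 'rage': 1,
--     'fear': 2, 'anxiety': 2, 'worry': 2, 'dread': 2,
--     'joy': 3, 'happiness': 3, 'ecstasy': 3, 'delight': 3,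
--     'peace': 4, 'calm': 4, 'serenity': 4, 'contentment': 4,
--     'love': 5, 'affection': 5, 'compassion': 5, 'tenderness': 5,
-- }
--
--
-- def _same_emotion_cluster(emotion1: str, emotion2: str) -> bool:
--     c1 = _CLUSTER_ID.get(emotion1)
--     c2 = _CLUSTER_ID.get(emotion2)
--     return c1 is not None and c1 == c2
-- ===== Notes on version B (the rewrite author's own statement) =====
-- stated objective: idiomatic
-- what changed: Replaces the per-call loop over cluster member lists with a single flat emotion->cluster-id dict literal; the function is two O(1) lookups and a guarded comparison, with no cluster table or membership scan left.
import Mathlib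
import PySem

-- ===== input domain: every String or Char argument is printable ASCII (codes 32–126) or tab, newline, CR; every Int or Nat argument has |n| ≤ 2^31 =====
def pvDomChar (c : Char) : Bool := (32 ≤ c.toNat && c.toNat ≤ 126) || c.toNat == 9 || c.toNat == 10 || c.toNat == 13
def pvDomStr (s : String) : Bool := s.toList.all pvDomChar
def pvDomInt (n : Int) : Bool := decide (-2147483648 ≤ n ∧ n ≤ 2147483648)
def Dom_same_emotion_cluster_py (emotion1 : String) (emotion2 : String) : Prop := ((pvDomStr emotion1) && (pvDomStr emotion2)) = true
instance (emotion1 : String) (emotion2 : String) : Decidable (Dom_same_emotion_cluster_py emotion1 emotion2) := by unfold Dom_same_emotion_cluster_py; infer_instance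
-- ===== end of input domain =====

-- B drops A's per-call scan over cluster member lists in favour of one flat emotion->cluster-id dict (two lookups and a guarded comparison); same return value everywhere.

-- ===== PORT A =====
-- the clusters dict (only its values are iterated), as an insertion-ordered association list
def pvClustersA : List (String × List String) :=
  [("sadness", ["sadness", "grief", "melancholy", "despair"]),
   ("anger", ["anger", "frustration", "irritation", "rage"]),
   ("fear", ["fear", "anxiety", "worry", "dread"]),
   ("joy", ["joy", "happiness", "ecstasy", "delight"]),
   ("peace", ["peace", "calm", "serenity", "contentment"]),
   ("love", ["love", "affection", "compassion", "tenderness"])]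

-- 'for cluster in clusters.values(): if emotion1 in cluster and emotion2 in cluster: return True' then 'return False'
def pvGoA (e1 e2 : String) : List (List String) → Bool
  | [] => false
  | cl :: rest => if cl.contains e1 && cl.contains e2 then true else pvGoA e1 e2 rest

def same_emotion_cluster_py (emotion1 : String) (emotion2 : String) : Bool :=
  pvGoA emotion1 emotion2 (pvClustersA.map (·.2))

-- ===== PORT B =====
-- _CLUSTER_ID, Source B's flat dict literal
def pvClusterId : PySem.Dict String Int :=
  PySem.Dict.ofList
    [("sadness", 0), ("grief", 0), ("melancholy", 0), ("despair", 0),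
     ("anger", 1), ("frustration", 1), ("irritation", 1), ("rage", 1),
     ("fear", 2), ("anxiety", 2), ("worry", 2), ("dread", 2),
     ("joy", 3), ("happiness", 3), ("ecstasy", 3), ("delight", 3),
     ("peace", 4), ("calm", 4), ("serenity", 4), ("contentment", 4),
     ("love", 5), ("affection", 5), ("compassion", 5), ("tenderness", 5)]

-- c1 = _CLUSTER_ID.get(emotion1); c2 = _CLUSTER_ID.get(emotion2); return c1 is not None and c1 == c2
def same_emotion_cluster_py_alt (emotion1 : String) (emotion2 : String) : Bool :=
  match PySem.Dict.get? pvClusterId emotion1, PySem.Dict.get? pvClusterId emotion2 with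
  | some c1, some c2 => c1 == c2
  | _, _ => false

-- ===== PRECONDITION & SPEC =====
def Spec_same_emotion_cluster_py (emotion1 : String) (emotion2 : String) (out : Bool) : Prop := out = same_emotion_cluster_py_alt emotion1 emotion2
instance (emotion1 : String) (emotion2 : String) (out : Bool) : Decidable (Spec_same_emotion_cluster_py emotion1 emotion2 out) := by unfold Spec_same_emotion_cluster_py; infer_instance

-- ===== CLAIM (what is proved, stated in full; the proofs are below) =====
def Claim_equal_same_emotion_cluster_py : Prop := ∀ (emotion1 : String) (emotion2 : String), Dom_same_emotion_cluster_py emotion1 emotion2 → Spec_same_emotion_cluster_py emotion1 emotion2 (same_emotion_cluster_py emotion1 emotion2)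

-- ===== LEMMAS AND PROOFS =====
-- the cluster table re-keyed by B's integer ids (proof-only abstraction of the two literals)
def pvTable : List (Int × List String) :=
  [(0, ["sadness", "grief", "melancholy", "despair"]),
   (1, ["anger", "frustration", "irritation", "rage"]),
   (2, ["fear", "anxiety", "worry", "dread"]),
   (3, ["joy", "happiness", "ecstasy", "delight"]),
   (4, ["peace", "calm", "serenity", "contentment"]),
   (5, ["love", "affection", "compassion", "tenderness"])]

-- find? with an equality predicate returns the sought element itself
lemma pvFind_beq (l : List String) (e : String) :
    l.find? (fun x => x == e) = if e ∈ l then some e else none := by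
  induction l with
  | nil => simp
  | cons a l ih =>
    by_cases ha : a = e
    · subst ha; simp
    · rw [List.find?_cons_of_neg (by simp [ha])]
      rw [ih]
      by_cases he : e ∈ l <;> simp [he, List.mem_cons, Ne.symm ha]

-- looking up e in the flattened (member, key) index finds the key of the first cluster containing e
lemma pvFlat_lookup {α : Type} (cs : List (α × List String)) (e : String) :
    ((cs.flatMap (fun p => p.2.map (fun x => (x, p.1)))).find? (fun q => q.1 == e)).map Prod.snd
      = (cs.find? (fun p => p.2.contains e)).map Prod.fst := by
  induction cs with
  | nil => simp
  | cons p rest ih =>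
    rw [List.flatMap_cons, List.find?_append]
    have hmapfind : (p.2.map (fun x => (x, p.1))).find? (fun q => q.1 == e)
        = (p.2.find? (fun x => x == e)).map (fun x => (x, p.1)) := by
      rw [List.find?_map]; rfl
    rw [hmapfind, pvFind_beq]
    by_cases he : e ∈ p.2
    · rw [List.find?_cons_of_pos (by simpa [List.contains_iff_mem] using he)]
      simp [he]
    · rw [List.find?_cons_of_neg (by simpa [List.contains_iff_mem] using he)]
      simpa [he] using ih

-- the first-matching key is one of the keys
lemma pvKey_mem {α : Type} (cs : List (α × List String)) (e : String) (k : α)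
    (h : (cs.find? (fun p => p.2.contains e)).map Prod.fst = some k) : k ∈ cs.map Prod.fst := by
  rcases Option.map_eq_some_iff.mp h with ⟨p, hp, hk⟩
  exact hk ▸ List.mem_map_of_mem (List.mem_of_find?_eq_some hp)

-- A's loop returns false when every cluster misses one of the two emotions
lemma pvGoA_false (e1 e2 : String) (cls : List (List String))
    (h : ∀ cl ∈ cls, cl.contains e1 = false ∨ cl.contains e2 = false) :
    pvGoA e1 e2 cls = false := by
  induction cls with
  | nil => rfl
  | cons cl rest ih =>
    have hrest : pvGoA e1 e2 rest = false := ih (fun c hcm => h c (List.mem_cons_of_mem _ hcm))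
    have hcond : (cl.contains e1 && cl.contains e2) = false := by
      rcases h cl (by simp) with hc | hc
      · rw [hc, Bool.false_and]
      · rw [hc, Bool.and_false]
    simp only [pvGoA, hcond, Bool.false_eq_true, if_false]
    exact hrest

-- core equivalence: scan-for-a-common-cluster equals lookup-then-compare, for any
-- cluster table with distinct keys and globally distinct members
lemma pvMain {α : Type} [BEq α] [LawfulBEq α] (cs : List (α × List String))
    (hk : (cs.map Prod.fst).Nodup) (hw : (cs.flatMap Prod.snd).Nodup) (e1 e2 : String) :
    pvGoA e1 e2 (cs.map Prod.snd) =
      (match (cs.find? (fun p => p.2.contains e1)).map Prod.fst,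
             (cs.find? (fun p => p.2.contains e2)).map Prod.fst with
       | some c1, some c2 => c1 == c2
       | _, _ => false) := by
  induction cs with
  | nil => rfl
  | cons p rest ih =>
    obtain ⟨hk1, hk2⟩ := List.nodup_cons.mp hk
    rw [List.flatMap_cons] at hw
    have hw2 : (rest.flatMap Prod.snd).Nodup := (List.nodup_append.mp hw).2.1
    have hdisj : ∀ x ∈ p.2, x ∉ rest.flatMap Prod.snd := by
      intro x hx hx2
      exact ((List.nodup_append.mp hw).2.2 x hx x hx2) rfl
    have hnotrest : ∀ x, x ∈ p.2 → ∀ cl ∈ rest.map Prod.snd, cl.contains x = false := by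
      intro x hx cl hcl
      rcases List.mem_map.mp hcl with ⟨q, hq, rfl⟩
      by_contra hc
      have hxq : x ∈ q.2 := by
        have := Bool.not_eq_false _ |>.mp hc
        simpa [List.contains_iff_mem] using this
      exact hdisj x hx (List.mem_flatMap.mpr ⟨q, hq, hxq⟩)
    rw [List.map_cons]
    by_cases h1 : p.2.contains e1 = true <;> by_cases h2 : p.2.contains e2 = true
    · -- both in the head cluster
      rw [List.find?_cons_of_pos (p := fun q : α × List String => q.2.contains e1) h1,
          List.find?_cons_of_pos (p := fun q : α × List String => q.2.contains e2) h2]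
      have hcond : (p.2.contains e1 && p.2.contains e2) = true := by rw [h1, h2]; rfl
      simp only [pvGoA, hcond, if_true]
      simp
    · -- e1 in head, e2 not
      rw [List.find?_cons_of_pos (p := fun q : α × List String => q.2.contains e1) h1,
          List.find?_cons_of_neg (p := fun q : α × List String => q.2.contains e2) h2]
      have hA : pvGoA e1 e2 (p.2 :: rest.map Prod.snd) = false := by
        apply pvGoA_false
        intro cl hcl
        rcases List.mem_cons.mp hcl with rfl | hcl2
        · right; simpa using h2
        · left
          exact hnotrest e1 (by simpa [List.contains_iff_mem] using h1) cl hcl2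
      rw [hA]
      cases hfe : (rest.find? (fun r => r.2.contains e2)).map Prod.fst with
      | none => simp
      | some k' =>
        have hne : p.1 ≠ k' := fun hkeq => hk1 (hkeq ▸ pvKey_mem rest e2 k' hfe)
        simp [hne]
    · -- e2 in head, e1 not
      rw [List.find?_cons_of_neg (p := fun q : α × List String => q.2.contains e1) h1,
          List.find?_cons_of_pos (p := fun q : α × List String => q.2.contains e2) h2]
      have hA : pvGoA e1 e2 (p.2 :: rest.map Prod.snd) = false := by
        apply pvGoA_false
        intro cl hcl
        rcases List.mem_cons.mp hcl with rfl | hcl2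
        · left; simpa using h1
        · right
          exact hnotrest e2 (by simpa [List.contains_iff_mem] using h2) cl hcl2
      rw [hA]
      cases hfe : (rest.find? (fun r => r.2.contains e1)).map Prod.fst with
      | none => simp
      | some k'' =>
        have hne : k'' ≠ p.1 := fun hkeq => hk1 (hkeq ▸ pvKey_mem rest e1 k'' hfe)
        simp [hne]
    · -- neither in the head cluster
      rw [List.find?_cons_of_neg (p := fun q : α × List String => q.2.contains e1) h1,
          List.find?_cons_of_neg (p := fun q : α × List String => q.2.contains e2) h2]
      have hcond : (p.2.contains e1 && p.2.contains e2) = false := by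
        cases hc1 : p.2.contains e1 with
        | true => exact absurd hc1 h1
        | false => simp
      have hstep : pvGoA e1 e2 (p.2 :: rest.map Prod.snd) = pvGoA e1 e2 (rest.map Prod.snd) := by
        simp only [pvGoA, hcond, Bool.false_eq_true, if_false]
      rw [hstep]
      exact ih hk2 hw2

-- B's literal dict has exactly the flattened (member, id) pairs of pvTable as items
lemma pvClusterId_items :
    pvClusterId.items = pvTable.flatMap (fun p => p.2.map (fun x => (x, p.1))) := by
  decide

-- B's lookup is the first-cluster id of pvTable
lemma pvGet_eq (e : String) :
    PySem.Dict.get? pvClusterId e = (pvTable.find? (fun p => p.2.contains e)).map Prod.fst := by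
  show (pvClusterId.items.find? (fun q => q.1 == e)).map (fun x => x.2) = _
  rw [pvClusterId_items]
  exact pvFlat_lookup pvTable e

-- ===== VERDICT (by name: the statement is the Claim_ definition above) =====
theorem same_emotion_cluster_py_spec : Claim_equal_same_emotion_cluster_py := by
  intro e1 e2 _
  unfold Spec_same_emotion_cluster_py same_emotion_cluster_py same_emotion_cluster_py_alt
  rw [pvGet_eq e1, pvGet_eq e2]
  have hmap : pvClustersA.map (·.2) = pvTable.map Prod.snd := by decide
  rw [hmap]
  have hk : (pvTable.map Prod.fst).Nodup := by decide
  have hw : (pvTable.flatMap Prod.snd).Nodup := by decide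
  rw [pvMain pvTable hk hw e1 e2]
  cases h1 : (pvTable.find? (fun p => p.2.contains e1)).map Prod.fst <;>
    cases h2 : (pvTable.find? (fun p => p.2.contains e2)).map Prod.fst <;> rfl
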